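-- pv_equiv track=rewrite | github.com/kishore-shiva/google-hashcode-2021 | hashCodePractice.py | maximize
-- ===== SOURCE A (Python) =====
-- def maximize(arr):
--     dic = {'2':0, '3':0, '4':0}
--     dicArr = {'2':[], '3':[], '4':[]}
--
--     for i in range(2**len(arr)):
--
--         t = [arr[j] for j in range(len(arr)) if(i & (1<<j))]
--         res = []
--
--         if(len(t)==2):
--             for j in t:
--                 for k in j:
--                     if(k not in res):
--                         res.append(k)
--             if len(res)>dic['2']:
--                 dic['2'] = len(res)
--                 dicArr['2'] = t
--
--         elif(len(t)==3):
--             for j in t: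
--                 for k in j:
--                     if(k not in res):
--                         res.append(k)
--             if len(res)>dic['3']:
--                 dic['3'] = len(res)
--                 dicArr['3'] = t
--
--         elif(len(t)==4):
--             for j in t:
--                 for k in j:
--                     if(k not in res):
--                         res.append(k)
--             if len(res)>dic['4']:
--                 dic['4'] = len(res)
--                 dicArr['4'] = t
--
--     return dic,dicArr
-- ===== SOURCE B (Python) =====
-- def maximize(arr):
--     n = len(arr)
--
--     def best(cands):
--         bl, bt = 0, []
--         for t in cands:
--             chars = set()
--             for s in t:
--                 chars.update(s)
--             if len(chars) > bl:
--                 bl, bt = len(chars), t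
--         return bl, bt
--
--     # combinations in colexicographic index order = increasing-bitmask order,
--     # so the first strict maximum matches A's tie-breaking
--     pairs = [[arr[a], arr[b]] for b in range(n) for a in range(b)]
--     triples = [[arr[a], arr[b], arr[c]] for c in range(n) for b in range(c) for a in range(b)]
--     quads = [[arr[a], arr[b], arr[c], arr[d]]
--              for d in range(n) for c in range(d) for b in range(c) for a in range(b)]
--     (n2, t2) = best(pairs)
--     (n3, t3) = best(triples)
--     (n4, t4) = best(quads)
--     return {'2': n2, '3': n3, '4': n4}, {'2': t2, '3': t3, '4': t4}
-- ===== Notes on version B (the rewrite author's own statement) =====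
-- stated objective: faster
-- what changed: B enumerates only the size-2, size-3 and size-4 index combinations in colexicographic order (which equals A's increasing-bitmask order, preserving the first-strict-maximum tie-breaking) and counts distinct characters with a set union, instead of scanning all 2^n bitmask subsets.
import Mathlib
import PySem

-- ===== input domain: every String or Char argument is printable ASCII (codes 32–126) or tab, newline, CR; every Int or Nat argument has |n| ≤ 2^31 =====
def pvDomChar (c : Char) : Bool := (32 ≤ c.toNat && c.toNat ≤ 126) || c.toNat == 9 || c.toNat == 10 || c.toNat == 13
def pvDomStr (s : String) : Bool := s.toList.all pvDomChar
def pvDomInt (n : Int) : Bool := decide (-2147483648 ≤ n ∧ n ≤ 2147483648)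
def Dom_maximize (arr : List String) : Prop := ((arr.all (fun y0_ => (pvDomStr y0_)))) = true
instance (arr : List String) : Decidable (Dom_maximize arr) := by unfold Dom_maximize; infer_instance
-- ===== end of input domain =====

-- B enumerates only the size-2/3/4 index combinations (in colexicographic = increasing-bitmask
-- order, preserving A's first-strict-maximum tie-breaking) instead of all 2^n subsets: faster.

-- ===== PORT A =====
-- the subset comprehension [arr[j] for j in range(len(arr)) if i & (1 << j)]
def aSubset (arr : List String) (i : Int) : List String :=
  ((PySem.List.pyRange 0 (PySem.List.len arr) 1).filter
      (fun j => decide (PySem.Int.band i (1 <<< j.toNat) ≠ 0))).map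
    (fun j => PySem.List.pyGetD arr j "")

-- loop body of A's 'for i in range(2**len(arr))' (dic, dicArr as the two dict accumulators);
-- dic['2'] is read with getD: the key is always present, so the KeyError case is unreachable
def aStep (arr : List String)
    (st : PySem.Dict String Int × PySem.Dict String (List String)) (i : Int) :
    PySem.Dict String Int × PySem.Dict String (List String) :=
  let t := aSubset arr i
  if t.length = 2 then
    let res := t.foldl (fun res s =>
      s.toList.foldl (fun res k => if k ∈ res then res else res ++ [k]) res) ([] : List Char)
    if PySem.List.len res > st.1.getD "2" 0 then
      (st.1.insert "2" (PySem.List.len res), st.2.insert "2" t)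
    else st
  else if t.length = 3 then
    let res := t.foldl (fun res s =>
      s.toList.foldl (fun res k => if k ∈ res then res else res ++ [k]) res) ([] : List Char)
    if PySem.List.len res > st.1.getD "3" 0 then
      (st.1.insert "3" (PySem.List.len res), st.2.insert "3" t)
    else st
  else if t.length = 4 then
    let res := t.foldl (fun res s =>
      s.toList.foldl (fun res k => if k ∈ res then res else res ++ [k]) res) ([] : List Char)
    if PySem.List.len res > st.1.getD "4" 0 then
      (st.1.insert "4" (PySem.List.len res), st.2.insert "4" t)
    else st
  else st

def maximize (arr : List String) : (List (String × Int)) × (List (String × List String)) :=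
  let final := (PySem.List.pyRange 0 (2 ^ arr.length) 1).foldl (aStep arr)
    (PySem.Dict.ofList [("2", 0), ("3", 0), ("4", 0)],
     PySem.Dict.ofList [("2", []), ("3", []), ("4", [])])
  (final.1.items, final.2.items)

-- ===== PORT B =====
-- B's helper best(cands): first candidate with strictly more distinct characters wins
def altBest (cands : List (List String)) : Int × List String :=
  cands.foldl (fun acc t =>
    let chars := t.foldl (fun s j => PySem.Set.update s j.toList) PySem.Set.empty
    if PySem.Set.len chars > acc.1 then (PySem.Set.len chars, t) else acc)
    (0, [])

def maximize_alt (arr : List String) : (List (String × Int)) × (List (String × List String)) :=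
  let n := PySem.List.len arr
  let g := fun i => PySem.List.pyGetD arr i ""
  let pairs := (PySem.List.pyRange 0 n 1).flatMap (fun b =>
    (PySem.List.pyRange 0 b 1).map (fun a => [g a, g b]))
  let triples := (PySem.List.pyRange 0 n 1).flatMap (fun c =>
    (PySem.List.pyRange 0 c 1).flatMap (fun b =>
      (PySem.List.pyRange 0 b 1).map (fun a => [g a, g b, g c])))
  let quads := (PySem.List.pyRange 0 n 1).flatMap (fun d =>
    (PySem.List.pyRange 0 d 1).flatMap (fun c =>
      (PySem.List.pyRange 0 c 1).flatMap (fun b =>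
        (PySem.List.pyRange 0 b 1).map (fun a => [g a, g b, g c, g d]))))
  let p2 := altBest pairs
  let p3 := altBest triples
  let p4 := altBest quads
  ([("2", p2.1), ("3", p3.1), ("4", p4.1)], [("2", p2.2), ("3", p3.2), ("4", p4.2)])

-- ===== PRECONDITION & SPEC =====
def Spec_maximize (arr : List String) (out : (List (String × Int)) × (List (String × List String))) : Prop := out = maximize_alt arr
instance (arr : List String) (out : (List (String × Int)) × (List (String × List String))) : Decidable (Spec_maximize arr out) := by unfold Spec_maximize; infer_instance

-- ===== CLAIM (what is proved, stated in full; the proofs are below) =====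
def Claim_equal_maximize : Prop := ∀ (arr : List String), Dom_maximize arr → Spec_maximize arr (maximize arr)

-- ===== LEMMAS AND PROOFS =====

-- number of distinct characters of a candidate, as both programs compute it
def score (t : List String) : Int :=
  PySem.Set.len (t.foldl (fun s j => PySem.Set.update s j.toList) PySem.Set.empty)

-- the shared "strictly better candidate replaces" update
def upd (acc : Int × List String) (t : List String) : Int × List String :=
  if score t > acc.1 then (score t, t) else acc

-- all sublists of arr of length k, in bitmask (= colexicographic) order
def subsK (arr : List String) (k : Nat) : List (List String) :=
  arr.sublists.filter (fun t => t.length = k)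

def packD (p2 p3 p4 : Int × List String) :
    PySem.Dict String Int × PySem.Dict String (List String) :=
  (PySem.Dict.ofList [("2", p2.1), ("3", p3.1), ("4", p4.1)],
   PySem.Dict.ofList [("2", p2.2), ("3", p3.2), ("4", p4.2)])

lemma score_eq_res (t : List String) :
    t.foldl (fun res s =>
      s.toList.foldl (fun res k => if k ∈ res then res else res ++ [k]) res) ([] : List Char)
    = t.foldl (fun s j => PySem.Set.update s j.toList) PySem.Set.empty := by
  apply PySem.List.foldl_congr_mem
  intro acc x _
  show x.toList.foldl _ acc = PySem.Set.update acc x.toList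
  rw [show PySem.Set.update acc x.toList = x.toList.foldl PySem.Set.add acc from rfl]
  apply PySem.List.foldl_congr_mem
  intro res k _
  rw [PySem.Set.add_eq_ite]

lemma aStep_packD (arr : List String) (p2 p3 p4 : Int × List String) (i : Int) :
    aStep arr (packD p2 p3 p4) i =
      if (aSubset arr i).length = 2 then packD (upd p2 (aSubset arr i)) p3 p4
      else if (aSubset arr i).length = 3 then packD p2 (upd p3 (aSubset arr i)) p4
      else if (aSubset arr i).length = 4 then packD p2 p3 (upd p4 (aSubset arr i))
      else packD p2 p3 p4 := by
  have hs : ∀ t : List String,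
      PySem.List.len (t.foldl (fun s j => PySem.Set.update s j.toList) PySem.Set.empty)
        = score t := fun _ => rfl
  unfold aStep upd
  simp only [score_eq_res, hs, packD,
    show ∀ (v2 v3 v4 : Int), (PySem.Dict.ofList [("2", v2), ("3", v3), ("4", v4)]).getD "2" 0 = v2 from fun _ _ _ => rfl,
    show ∀ (v2 v3 v4 : Int), (PySem.Dict.ofList [("2", v2), ("3", v3), ("4", v4)]).getD "3" 0 = v3 from fun _ _ _ => rfl,
    show ∀ (v2 v3 v4 : Int), (PySem.Dict.ofList [("2", v2), ("3", v3), ("4", v4)]).getD "4" 0 = v4 from fun _ _ _ => rfl]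
  split_ifs <;> rfl

lemma foldA (arr : List String) (l : List Int) (p2 p3 p4 : Int × List String) :
    l.foldl (aStep arr) (packD p2 p3 p4) =
      packD (((l.map (aSubset arr)).filter (fun t => t.length = 2)).foldl upd p2)
            (((l.map (aSubset arr)).filter (fun t => t.length = 3)).foldl upd p3)
            (((l.map (aSubset arr)).filter (fun t => t.length = 4)).foldl upd p4) := by
  induction l generalizing p2 p3 p4 with
  | nil => rfl
  | cons i rest ih =>
    simp only [List.foldl_cons, List.map_cons, List.filter_cons]
    rw [aStep_packD]
    by_cases h2 : (aSubset arr i).length = 2 <;>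
      by_cases h3 : (aSubset arr i).length = 3 <;>
        by_cases h4 : (aSubset arr i).length = 4 <;>
          first
          | omega
          | simp [h2, h3, h4, ih]

lemma aSubset_nat (arr : List String) (m : Nat) :
    aSubset arr (m : Int) =
      ((List.range arr.length).filter (fun j => m.testBit j)).map
        (fun j : Nat => PySem.List.pyGetD arr (j : Int) "") := by
  have hfil : List.filter (fun x : Nat => decide (PySem.Int.band (m : Int) (1 <<< ((x : Int)).toNat) ≠ 0)) (List.range arr.length)
      = List.filter (fun j => m.testBit j) (List.range arr.length) := by
    apply List.filter_congr
    intro j _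
    rw [PySem.Int.band_natCast]
    simp [Nat.one_shiftLeft, Nat.and_two_pow]
  unfold aSubset
  rw [PySem.List.len_eq, PySem.List.pyRange_zero_natCast, List.filter_map, List.map_map]
  simp only [Function.comp_def]
  rw [hfil]

lemma aSubset_append_lt (l : List String) (x : String) (m : Nat) (hm : m < 2 ^ l.length) :
    aSubset (l ++ [x]) (m : Int) = aSubset l (m : Int) := by
  rw [aSubset_nat, aSubset_nat]
  rw [List.length_append, List.length_singleton, List.range_succ, List.filter_append,
    List.map_append]
  have htop : List.filter (fun j => m.testBit j) [l.length] = [] := by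
    simp [Nat.testBit_lt_two_pow hm]
  rw [htop, List.map_nil, List.append_nil]
  apply List.map_congr_left
  intro j hj
  have hjl : j < l.length := by
    have := List.of_mem_filter hj
    have := (List.mem_range).mp (List.mem_of_mem_filter hj)
    omega
  simp [PySem.List.pyGetD_natCast, List.getElem?_append_left hjl]

lemma aSubset_append_add (l : List String) (x : String) (m : Nat) (hm : m < 2 ^ l.length) :
    aSubset (l ++ [x]) ((2 ^ l.length + m : Nat) : Int) = aSubset l (m : Int) ++ [x] := by
  rw [aSubset_nat, aSubset_nat]
  rw [List.length_append, List.length_singleton, List.range_succ, List.filter_append,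
    List.map_append]
  have hfil : List.filter (fun j => (2 ^ l.length + m).testBit j) (List.range l.length)
      = List.filter (fun j => m.testBit j) (List.range l.length) := by
    apply List.filter_congr
    intro j hj
    exact Nat.testBit_two_pow_add_gt (List.mem_range.mp hj) m
  have htop : List.filter (fun j => (2 ^ l.length + m).testBit j) [l.length] = [l.length] := by
    simp [Nat.testBit_two_pow_add_eq, Nat.testBit_lt_two_pow hm]
  rw [hfil, htop]
  have hx : PySem.List.pyGetD (l ++ [x]) ((l.length : Nat) : Int) "" = x := by
    simp [PySem.List.pyGetD_natCast]
  rw [List.map_singleton, hx]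
  congr 1
  apply List.map_congr_left
  intro j hj
  have hjl : j < l.length := List.mem_range.mp (List.mem_of_mem_filter hj)
  simp [PySem.List.pyGetD_natCast, List.getElem?_append_left hjl]

lemma masks_eq_sublists (arr : List String) :
    (List.range (2 ^ arr.length)).map (fun m : Nat => aSubset arr (m : Int)) = arr.sublists := by
  induction arr using List.reverseRecOn with
  | nil => rfl
  | append_singleton l x ih =>
    rw [List.length_append, List.length_singleton, pow_succ, mul_two, List.range_add,
      List.map_append, List.map_map, List.sublists_concat, ← ih]
    congr 1
    · apply List.map_congr_left
      intro m hm
      exact aSubset_append_lt l x m (List.mem_range.mp hm)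
    · rw [List.map_map]
      apply List.map_congr_left
      intro m hm
      exact aSubset_append_add l x m (List.mem_range.mp hm)

lemma subsK_zero (l : List String) : subsK l 0 = [[]] := by
  induction l using List.reverseRecOn with
  | nil => rfl
  | append_singleton l x ih =>
    unfold subsK at *
    rw [List.sublists_concat, List.filter_append, ih]
    simp

lemma subsK_concat (l : List String) (x : String) (k : Nat) :
    subsK (l ++ [x]) (k + 1) = subsK l (k + 1) ++ (subsK l k).map (· ++ [x]) := by
  unfold subsK
  rw [List.sublists_concat, List.filter_append]
  congr 1
  rw [List.filter_map]
  congr 1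
  apply List.filter_congr
  intro t _
  simp [Function.comp]

lemma subsK_one (l : List String) : subsK l 1 = l.map (fun y => [y]) := by
  induction l using List.reverseRecOn with
  | nil => rfl
  | append_singleton l x ih =>
    rw [show (1 : Nat) = 0 + 1 from rfl, subsK_concat, subsK_zero, ih]
    simp

lemma getD_append_int (l : List String) (x : String) (a : Int) (h0 : 0 ≤ a)
    (h : a < (l.length : Int)) :
    PySem.List.pyGetD (l ++ [x]) a "" = PySem.List.pyGetD l a "" := by
  have hn : a.toNat < l.length := by omega
  rw [PySem.List.pyGetD_eq_getElem (l ++ [x]) "" h0 (by simp; omega),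
    PySem.List.pyGetD_eq_getElem l "" h0 (by exact_mod_cast h)]
  exact List.getElem_append_left hn

lemma getD_append_self (l : List String) (x : String) :
    PySem.List.pyGetD (l ++ [x]) ((l.length : Nat) : Int) "" = x := by
  simp [PySem.List.pyGetD_natCast]

-- B's nested colex loops, generalised by a common suffix for the snoc induction
lemma bcomb2 (arr : List String) (suf : List String) :
    (PySem.List.pyRange 0 (PySem.List.len arr) 1).flatMap (fun b =>
      (PySem.List.pyRange 0 b 1).map (fun a =>
        [PySem.List.pyGetD arr a "", PySem.List.pyGetD arr b ""] ++ suf))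
    = (subsK arr 2).map (· ++ suf) := by
  induction arr using List.reverseRecOn with
  | nil => rfl
  | append_singleton l x ih =>
    rw [PySem.List.len_eq, List.length_append, List.length_singleton,
      PySem.List.pyRange_zero_natCast, List.range_succ, List.map_append,
      List.flatMap_append, List.map_singleton, List.flatMap_singleton, List.flatMap_map]
    rw [show (2 : Nat) = 1 + 1 from rfl, subsK_concat, List.map_append]
    congr 1
    · -- the combinations not using x
      rw [← ih, PySem.List.len_eq, PySem.List.pyRange_zero_natCast, List.flatMap_map]
      apply List.flatMap_congr
      intro b hb
      have hbn : b < l.length := List.mem_range.mp hb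
      apply List.map_congr_left
      intro a ha
      have han := (PySem.List.mem_pyRange_one).mp ha
      rw [getD_append_int l x a han.1 (by omega),
        getD_append_int l x (b : Int) (by positivity) (by exact_mod_cast hbn)]
    · -- the combinations whose largest index is the new element x
      rw [getD_append_self, subsK_one, List.map_map, List.map_map]
      have : ∀ a ∈ PySem.List.pyRange 0 (l.length : Int) 1,
          ([PySem.List.pyGetD (l ++ [x]) a "", x] ++ suf)
            = ((fun y => [y, x] ++ suf) (PySem.List.pyGetD l a "")) := by
        intro a ha
        have han := (PySem.List.mem_pyRange_one).mp ha
        rw [getD_append_int l x a han.1 (by exact_mod_cast han.2)]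
      rw [List.map_congr_left this]
      conv_lhs => rw [show (fun a => (fun y => [y, x] ++ suf) (PySem.List.pyGetD l a ""))
          = ((fun y => [y, x] ++ suf) ∘ (fun a : Int => PySem.List.pyGetD l a "")) from rfl,
        ← List.map_map]
      rw [show PySem.List.pyRange 0 (l.length : Int) 1 = PySem.List.pyRange 0 (PySem.List.len l) 1 by rw [PySem.List.len_eq],
        PySem.List.map_pyGetD_pyRange_zero]
      simp

lemma bcomb3 (arr : List String) (suf : List String) :
    (PySem.List.pyRange 0 (PySem.List.len arr) 1).flatMap (fun c =>
      (PySem.List.pyRange 0 c 1).flatMap (fun b =>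
        (PySem.List.pyRange 0 b 1).map (fun a =>
          [PySem.List.pyGetD arr a "", PySem.List.pyGetD arr b "",
           PySem.List.pyGetD arr c ""] ++ suf)))
    = (subsK arr 3).map (· ++ suf) := by
  induction arr using List.reverseRecOn with
  | nil => rfl
  | append_singleton l x ih =>
    rw [PySem.List.len_eq, List.length_append, List.length_singleton,
      PySem.List.pyRange_zero_natCast, List.range_succ, List.map_append,
      List.flatMap_append, List.map_singleton, List.flatMap_singleton, List.flatMap_map]
    rw [show (3 : Nat) = 2 + 1 from rfl, subsK_concat, List.map_append]
    congr 1
    · -- the combinations not using x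
      rw [← ih, PySem.List.len_eq, PySem.List.pyRange_zero_natCast, List.flatMap_map]
      apply List.flatMap_congr
      intro c hc
      have hcn : c < l.length := List.mem_range.mp hc
      apply List.flatMap_congr
      intro b hb
      have hbn := (PySem.List.mem_pyRange_one).mp hb
      apply List.map_congr_left
      intro a ha
      have han := (PySem.List.mem_pyRange_one).mp ha
      rw [getD_append_int l x a han.1 (by omega),
        getD_append_int l x b hbn.1 (by omega),
        getD_append_int l x (c : Int) (by positivity) (by exact_mod_cast hcn)]
    · -- the combinations whose largest index is the new element x
      rw [getD_append_self]
      have hcongr : ∀ b ∈ PySem.List.pyRange 0 (l.length : Int) 1,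
          (PySem.List.pyRange 0 b 1).map
              (fun a => [PySem.List.pyGetD (l ++ [x]) a "", PySem.List.pyGetD (l ++ [x]) b "", x] ++ suf)
            = (PySem.List.pyRange 0 b 1).map
              (fun a => [PySem.List.pyGetD l a "", PySem.List.pyGetD l b ""] ++ ([x] ++ suf)) := by
        intro b hb
        have hbn := (PySem.List.mem_pyRange_one).mp hb
        apply List.map_congr_left
        intro a ha
        have han := (PySem.List.mem_pyRange_one).mp ha
        rw [getD_append_int l x a han.1 (by omega),
          getD_append_int l x b hbn.1 (by omega)]
        simp
      have h2 := bcomb2 l ([x] ++ suf)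
      rw [PySem.List.len_eq] at h2
      rw [List.flatMap_congr hcongr, h2, List.map_map]
      apply List.map_congr_left
      intro t _
      simp

lemma bcomb4 (arr : List String) (suf : List String) :
    (PySem.List.pyRange 0 (PySem.List.len arr) 1).flatMap (fun d =>
      (PySem.List.pyRange 0 d 1).flatMap (fun c =>
        (PySem.List.pyRange 0 c 1).flatMap (fun b =>
          (PySem.List.pyRange 0 b 1).map (fun a =>
            [PySem.List.pyGetD arr a "", PySem.List.pyGetD arr b "",
             PySem.List.pyGetD arr c "", PySem.List.pyGetD arr d ""] ++ suf))))
    = (subsK arr 4).map (· ++ suf) := by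
  induction arr using List.reverseRecOn with
  | nil => rfl
  | append_singleton l x ih =>
    rw [PySem.List.len_eq, List.length_append, List.length_singleton,
      PySem.List.pyRange_zero_natCast, List.range_succ, List.map_append,
      List.flatMap_append, List.map_singleton, List.flatMap_singleton, List.flatMap_map]
    rw [show (4 : Nat) = 3 + 1 from rfl, subsK_concat, List.map_append]
    congr 1
    · -- the combinations not using x
      rw [← ih, PySem.List.len_eq, PySem.List.pyRange_zero_natCast, List.flatMap_map]
      apply List.flatMap_congr
      intro d hd
      have hdn : d < l.length := List.mem_range.mp hd
      apply List.flatMap_congr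
      intro c hc
      have hcn := (PySem.List.mem_pyRange_one).mp hc
      apply List.flatMap_congr
      intro b hb
      have hbn := (PySem.List.mem_pyRange_one).mp hb
      apply List.map_congr_left
      intro a ha
      have han := (PySem.List.mem_pyRange_one).mp ha
      rw [getD_append_int l x a han.1 (by omega),
        getD_append_int l x b hbn.1 (by omega),
        getD_append_int l x c hcn.1 (by omega),
        getD_append_int l x (d : Int) (by positivity) (by exact_mod_cast hdn)]
    · -- the combinations whose largest index is the new element x
      rw [getD_append_self]
      have hcongr : ∀ c ∈ PySem.List.pyRange 0 (l.length : Int) 1,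
          (PySem.List.pyRange 0 c 1).flatMap (fun b =>
            (PySem.List.pyRange 0 b 1).map
              (fun a => [PySem.List.pyGetD (l ++ [x]) a "", PySem.List.pyGetD (l ++ [x]) b "",
                PySem.List.pyGetD (l ++ [x]) c "", x] ++ suf))
            = (PySem.List.pyRange 0 c 1).flatMap (fun b =>
              (PySem.List.pyRange 0 b 1).map
                (fun a => [PySem.List.pyGetD l a "", PySem.List.pyGetD l b "",
                  PySem.List.pyGetD l c ""] ++ ([x] ++ suf))) := by
        intro c hc
        have hcn := (PySem.List.mem_pyRange_one).mp hc
        apply List.flatMap_congr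
        intro b hb
        have hbn := (PySem.List.mem_pyRange_one).mp hb
        apply List.map_congr_left
        intro a ha
        have han := (PySem.List.mem_pyRange_one).mp ha
        rw [getD_append_int l x a han.1 (by omega),
          getD_append_int l x b hbn.1 (by omega),
          getD_append_int l x c hcn.1 (by omega)]
        simp
      have h3 := bcomb3 l ([x] ++ suf)
      rw [PySem.List.len_eq] at h3
      rw [List.flatMap_congr hcongr, h3, List.map_map]
      apply List.map_congr_left
      intro t _
      simp

lemma masks_map (arr : List String) :
    (PySem.List.pyRange 0 ((2 : Int) ^ arr.length) 1).map (aSubset arr) = arr.sublists := by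
  rw [show ((2 : Int) ^ arr.length) = ((2 ^ arr.length : Nat) : Int) by push_cast; ring,
    PySem.List.pyRange_zero_natCast, List.map_map]
  exact masks_eq_sublists arr

lemma altBest_eq_foldl (cands : List (List String)) :
    altBest cands = cands.foldl upd (0, []) := rfl

lemma maximize_eq_packD (arr : List String) :
    maximize arr =
      ((packD ((subsK arr 2).foldl upd (0, [])) ((subsK arr 3).foldl upd (0, []))
          ((subsK arr 4).foldl upd (0, []))).1.items,
       (packD ((subsK arr 2).foldl upd (0, [])) ((subsK arr 3).foldl upd (0, []))
          ((subsK arr 4).foldl upd (0, []))).2.items) := by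
  unfold maximize
  rw [show (PySem.Dict.ofList [("2", (0:Int)), ("3", 0), ("4", 0)],
      PySem.Dict.ofList [("2", ([]:List String)), ("3", []), ("4", [])])
      = packD (0, []) (0, []) (0, []) from rfl]
  rw [foldA, masks_map]
  rfl

lemma pairs_eq (arr : List String) :
    (PySem.List.pyRange 0 (PySem.List.len arr) 1).flatMap (fun b =>
      (PySem.List.pyRange 0 b 1).map (fun a =>
        [PySem.List.pyGetD arr a "", PySem.List.pyGetD arr b ""]))
    = subsK arr 2 := by
  have h := bcomb2 arr []
  simpa using h

lemma triples_eq (arr : List String) :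
    (PySem.List.pyRange 0 (PySem.List.len arr) 1).flatMap (fun c =>
      (PySem.List.pyRange 0 c 1).flatMap (fun b =>
        (PySem.List.pyRange 0 b 1).map (fun a =>
          [PySem.List.pyGetD arr a "", PySem.List.pyGetD arr b "",
           PySem.List.pyGetD arr c ""])))
    = subsK arr 3 := by
  have h := bcomb3 arr []
  simpa using h

lemma quads_eq (arr : List String) :
    (PySem.List.pyRange 0 (PySem.List.len arr) 1).flatMap (fun d =>
      (PySem.List.pyRange 0 d 1).flatMap (fun c =>
        (PySem.List.pyRange 0 c 1).flatMap (fun b =>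
          (PySem.List.pyRange 0 b 1).map (fun a =>
            [PySem.List.pyGetD arr a "", PySem.List.pyGetD arr b "",
             PySem.List.pyGetD arr c "", PySem.List.pyGetD arr d ""]))))
    = subsK arr 4 := by
  have h := bcomb4 arr []
  simpa using h

-- ===== VERDICT (by name: the statement is the Claim_ definition above) =====
theorem maximize_spec : Claim_equal_maximize := by
  intro arr _
  show maximize arr = maximize_alt arr
  rw [maximize_eq_packD]
  have halt : maximize_alt arr =
      ([("2", (altBest ((PySem.List.pyRange 0 (PySem.List.len arr) 1).flatMap (fun b =>
          (PySem.List.pyRange 0 b 1).map (fun a =>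
            [PySem.List.pyGetD arr a "", PySem.List.pyGetD arr b ""])))).1),
        ("3", (altBest ((PySem.List.pyRange 0 (PySem.List.len arr) 1).flatMap (fun c =>
          (PySem.List.pyRange 0 c 1).flatMap (fun b =>
            (PySem.List.pyRange 0 b 1).map (fun a =>
              [PySem.List.pyGetD arr a "", PySem.List.pyGetD arr b "",
               PySem.List.pyGetD arr c ""]))))).1),
        ("4", (altBest ((PySem.List.pyRange 0 (PySem.List.len arr) 1).flatMap (fun d =>
          (PySem.List.pyRange 0 d 1).flatMap (fun c =>
            (PySem.List.pyRange 0 c 1).flatMap (fun b =>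
              (PySem.List.pyRange 0 b 1).map (fun a =>
                [PySem.List.pyGetD arr a "", PySem.List.pyGetD arr b "",
                 PySem.List.pyGetD arr c "", PySem.List.pyGetD arr d ""])))))).1)],
       [("2", (altBest ((PySem.List.pyRange 0 (PySem.List.len arr) 1).flatMap (fun b =>
          (PySem.List.pyRange 0 b 1).map (fun a =>
            [PySem.List.pyGetD arr a "", PySem.List.pyGetD arr b ""])))).2),
        ("3", (altBest ((PySem.List.pyRange 0 (PySem.List.len arr) 1).flatMap (fun c =>
          (PySem.List.pyRange 0 c 1).flatMap (fun b =>
            (PySem.List.pyRange 0 b 1).map (fun a =>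
              [PySem.List.pyGetD arr a "", PySem.List.pyGetD arr b "",
               PySem.List.pyGetD arr c ""]))))).2),
        ("4", (altBest ((PySem.List.pyRange 0 (PySem.List.len arr) 1).flatMap (fun d =>
          (PySem.List.pyRange 0 d 1).flatMap (fun c =>
            (PySem.List.pyRange 0 c 1).flatMap (fun b =>
              (PySem.List.pyRange 0 b 1).map (fun a =>
                [PySem.List.pyGetD arr a "", PySem.List.pyGetD arr b "",
                 PySem.List.pyGetD arr c "", PySem.List.pyGetD arr d ""])))))).2)]) := rfl
  rw [halt, pairs_eq, triples_eq, quads_eq, altBest_eq_foldl, altBest_eq_foldl, altBest_eq_foldl]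
  rfl
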